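-- pv_equiv track=rewrite | github.com/pc5401/my_BOJ | 백준/Silver/23056. 참가자 명단/참가자 명단.py | solve
-- ===== SOURCE A (Python) =====
-- def solve(N: int, M: int, class_name: list[tuple[int, str]]) -> list[tuple[int, str]]:
--     blue = []
--     white = []
--
--     limited = { i:0 for i in range(1, N+1) }
--
--     for cls, name in class_name:
--         limited[cls] += 1
--         if limited[cls] > M:
--             continue
--
--         if cls % 2:
--             blue.append((cls, name))
--         else:
--             white.append((cls, name))
--
--     blue.sort(key=lambda x : (x[0], len(x[1]), x[1]))
--     white.sort(key=lambda x : (x[0], len(x[1]), x[1]))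
--
--     return blue + white
-- ===== SOURCE B (Python) =====
-- def solve(N: int, M: int, class_name: list[tuple[int, str]]) -> list[tuple[int, str]]:
--     # group by class (classes pre-initialised for 1..N, so an unknown class still
--     # raises KeyError), keeping at most the first M entries of each class
--     groups = {i: [] for i in range(1, N + 1)}
--     for cls, name in class_name:
--         g = groups[cls]
--         if len(g) < M:
--             g = g + [(cls, name)]
--         groups[cls] = g
--     kept = [p for g in groups.values() for p in g]
--     kept.sort(key=lambda x: (x[0] % 2 == 0, x[0], len(x[1]), x[1]))
--     return kept
-- ===== Notes on version B (the rewrite author's own statement) =====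
-- stated objective: alternative
-- what changed: B replaces A's running-counter dict with continue-skips feeding two parity lists sorted separately by a per-class grouping dict capped at M entries per class, flattened and sorted once by the combined key (class even?, class, len(name), name).
import Mathlib
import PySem

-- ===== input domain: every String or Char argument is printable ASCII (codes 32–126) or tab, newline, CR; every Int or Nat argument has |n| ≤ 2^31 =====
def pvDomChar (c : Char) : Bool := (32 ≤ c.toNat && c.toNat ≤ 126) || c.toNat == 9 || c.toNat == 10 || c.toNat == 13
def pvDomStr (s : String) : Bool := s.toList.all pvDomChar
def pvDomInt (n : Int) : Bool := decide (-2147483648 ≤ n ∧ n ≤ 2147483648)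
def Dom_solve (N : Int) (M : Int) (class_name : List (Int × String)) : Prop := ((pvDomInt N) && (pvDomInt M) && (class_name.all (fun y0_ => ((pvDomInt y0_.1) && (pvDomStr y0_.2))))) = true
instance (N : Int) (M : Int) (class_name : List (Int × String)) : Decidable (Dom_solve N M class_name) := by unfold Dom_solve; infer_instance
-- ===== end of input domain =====

-- B replaces A's running-count skip loop and two separately sorted lists by a per-class
-- grouping dict capped at M entries per class and ONE sort keyed by (class even?, class, len(name), name).

-- Python's tuple key (cls, len(name), name): lexicographic order
def keyA (x : Int × String) : Lex (Int × Lex (Int × String)) :=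
  toLex (x.1, toLex ((PySem.Str.len x.2), x.2))

-- Python's tuple key (cls % 2 == 0, cls, len(name), name)
def keyB (x : Int × String) : Lex (Bool × Lex (Int × Lex (Int × String))) :=
  toLex ((PySem.Int.mod x.1 2 == 0), keyA x)

-- ===== PORT A =====
def solve (N : Int) (M : Int) (class_name : List (Int × String)) : List (Int × String) :=
  -- dict comprehension { i: 0 for i in range(1, N+1) }: keys are distinct, so the dict IS the pair list
  let limited := PySem.Dict.mk ((PySem.List.pyRange 1 (N+1) 1).map (fun i => (i, (0 : Int))))
  let st := class_name.foldl
    (fun (o : Option (List (Int × String) × List (Int × String) × PySem.Dict Int Int)) p =>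
      o.bind (fun bwd =>
        match bwd.2.2.get? p.1 with
        | none => none   -- KeyError in `limited[cls] += 1`
        | some v =>
          let d := bwd.2.2.insert p.1 (v + 1)
          if v + 1 > M then some (bwd.1, bwd.2.1, d)
          else if PySem.Int.mod p.1 2 ≠ 0 then some (bwd.1 ++ [p], bwd.2.1, d)
          else some (bwd.1, bwd.2.1 ++ [p], d)))
    (some ([], [], limited))
  match st with
  | none => []
  | some (b, w, _) => PySem.List.sorted b keyA false ++ PySem.List.sorted w keyA false

-- ===== PORT B =====
def solve_alt (N : Int) (M : Int) (class_name : List (Int × String)) : List (Int × String) :=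
  -- dict comprehension { i: [] for i in range(1, N+1) }: keys are distinct, so the dict IS the pair list
  let groups0 := PySem.Dict.mk ((PySem.List.pyRange 1 (N+1) 1).map (fun i => (i, ([] : List (Int × String)))))
  let st := class_name.foldl
    (fun (o : Option (PySem.Dict Int (List (Int × String)))) p =>
      o.bind (fun d =>
        match d.get? p.1 with
        | none => none   -- KeyError in `groups[cls]`
        | some g =>
          let g' := if (g.length : Int) < M then g ++ [p] else g
          some (d.insert p.1 g')))
    (some groups0)
  match st with
  | none => []
  | some groups =>
    let kept := (PySem.Dict.values groups).foldl (fun acc g => acc ++ g) []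
    PySem.List.sorted kept keyB false

-- ===== PRECONDITION & SPEC =====
-- Pre_ excludes exactly the inputs on which A raises KeyError (some class outside 1..N)
def Pre_solve (N : Int) (M : Int) (class_name : List (Int × String)) : Prop :=
  ∀ p ∈ class_name, 1 ≤ p.1 ∧ p.1 ≤ N
instance (N : Int) (M : Int) (class_name : List (Int × String)) : Decidable (Pre_solve N M class_name) := by unfold Pre_solve; infer_instance
def pvWitness_solve : Int × Int × (List (Int × String)) := (2, 1, [(1, "a"), (2, "bb"), (1, "c")])

def Spec_solve (N : Int) (M : Int) (class_name : List (Int × String)) (out : List (Int × String)) : Prop := out = solve_alt N M class_name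
instance (N : Int) (M : Int) (class_name : List (Int × String)) (out : List (Int × String)) : Decidable (Spec_solve N M class_name out) := by unfold Spec_solve; infer_instance

-- ===== CLAIM (what is proved, stated in full; the proofs are below) =====
def Claim_equal_solve : Prop := ∀ (N : Int) (M : Int) (class_name : List (Int × String)), Dom_solve N M class_name → Pre_solve N M class_name → Spec_solve N M class_name (solve N M class_name)

-- ===== LEMMAS AND PROOFS =====

-- spec-side list of the entries A keeps: counts threaded through a dict, like A's loop
def keptA (M : Int) (d : PySem.Dict Int Int) : List (Int × String) → List (Int × String)
  | [] => []
  | p :: t =>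
    let n := d.getD p.1 0 + 1
    let d' := d.insert p.1 n
    if n > M then keptA M d' t else p :: keptA M d' t

def oddD (p : Int × String) : Bool := decide (PySem.Int.mod p.1 2 ≠ 0)

theorem pymod2_zero_iff (x : Int) : (PySem.Int.mod x 2 = 0) ↔ 2 ∣ x := by
  rw [PySem.Int.mod, Int.fmod_eq_emod]
  norm_num

theorem keptA_subset (M : Int) (d : PySem.Dict Int Int) (l : List (Int × String)) :
    ∀ p ∈ keptA M d l, p ∈ l := by
  induction l generalizing d with
  | nil => simp [keptA]
  | cons p t ih =>
    intro q hq
    simp only [keptA] at hq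
    split at hq
    · exact List.mem_cons_of_mem _ (ih _ _ hq)
    · rcases List.mem_cons.mp hq with h | h
      · exact h ▸ List.mem_cons_self
      · exact List.mem_cons_of_mem _ (ih _ _ h)

theorem keptA_filter (M : Int) (l : List (Int × String)) (c : Int) :
    ∀ (d : PySem.Dict Int Int),
    (keptA M d l).filter (fun p => p.1 == c)
      = (l.filter (fun p => p.1 == c)).take (M - d.getD c 0).toNat := by
  induction l with
  | nil => intro d; simp [keptA]
  | cons p t ih =>
    intro d
    simp only [keptA]
    by_cases hc : p.1 = c
    · have hg : (d.insert p.1 (d.getD p.1 0 + 1)).getD c 0 = d.getD c 0 + 1 := by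
        subst hc; rw [PySem.Dict.getD_insert_self]
      by_cases hM : d.getD p.1 0 + 1 > M
      · rw [if_pos hM]
        rw [ih, hg, List.filter_cons_of_pos (by simp [hc])]
        have h1 : (M - d.getD c 0).toNat = 0 := by subst hc; omega
        have h2 : (M - (d.getD c 0 + 1)).toNat = 0 := by subst hc; omega
        rw [h1, h2]
        simp
      · rw [if_neg hM]
        rw [List.filter_cons_of_pos (by simp [hc]), List.filter_cons_of_pos (by simp [hc])]
        rw [ih, hg]
        have h1 : (M - d.getD c 0).toNat = (M - (d.getD c 0 + 1)).toNat + 1 := by subst hc; omega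
        rw [h1, List.take_succ_cons]
    · have hg : (d.insert p.1 (d.getD p.1 0 + 1)).getD c 0 = d.getD c 0 := by
        simp [PySem.Dict.getD_insert, Ne.symm hc]
      by_cases hM : d.getD p.1 0 + 1 > M
      · rw [if_pos hM, List.filter_cons_of_neg (by simp [hc]), ih, hg]
      · rw [if_neg hM, List.filter_cons_of_neg (by simp [hc]), ih, hg, List.filter_cons_of_neg (by simp [hc])]

-- A's loop, with the dict lookups known to succeed
theorem loopA (M : Int) (l : List (Int × String)) :
    ∀ (b w : List (Int × String)) (d : PySem.Dict Int Int),
      (∀ p ∈ l, (d.get? p.1).isSome) →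
      l.foldl
        (fun (o : Option (List (Int × String) × List (Int × String) × PySem.Dict Int Int)) p =>
          o.bind (fun bwd =>
            match bwd.2.2.get? p.1 with
            | none => none
            | some v =>
              let d := bwd.2.2.insert p.1 (v + 1)
              if v + 1 > M then some (bwd.1, bwd.2.1, d)
              else if PySem.Int.mod p.1 2 ≠ 0 then some (bwd.1 ++ [p], bwd.2.1, d)
              else some (bwd.1, bwd.2.1 ++ [p], d)))
        (some (b, w, d))
      = some (b ++ (keptA M d l).filter oddD, w ++ (keptA M d l).filter (fun p => !oddD p),
              l.foldl (fun d p => d.insert p.1 (d.getD p.1 0 + 1)) d) := by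
  induction l with
  | nil => intro b w d _; simp [keptA]
  | cons p t ih =>
    intro b w d hs
    have hv : d.get? p.1 = some (d.getD p.1 0) := by
      rcases Option.isSome_iff_exists.mp (hs p List.mem_cons_self) with ⟨v, hv⟩
      rw [hv, PySem.Dict.getD_eq_get?_getD, hv]; rfl
    simp only [List.foldl_cons, Option.bind_some, hv]
    have hs' : ∀ q ∈ t, ((d.insert p.1 (d.getD p.1 0 + 1)).get? q.1).isSome := by
      intro q hq
      by_cases h : q.1 = p.1
      · rw [h, PySem.Dict.get?_insert_self]; rfl
      · rw [PySem.Dict.get?_insert]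
        simp only [if_neg h]
        exact hs q (List.mem_cons_of_mem _ hq)
    simp only [keptA]
    by_cases hM : d.getD p.1 0 + 1 > M
    · rw [if_pos hM, if_pos hM]
      rw [ih _ _ _ hs']
    · rw [if_neg hM, if_neg hM]
      by_cases hodd : PySem.Int.mod p.1 2 ≠ 0
      · rw [if_pos hodd, ih _ _ _ hs']
        have ho : oddD p = true := by simp only [oddD, decide_eq_true_eq]; exact hodd
        rw [List.filter_cons_of_pos ho, List.filter_cons_of_neg (by simp [ho])]
        simp
      · rw [if_neg hodd, ih _ _ _ hs']
        have ho : oddD p = false := by simp only [oddD, decide_eq_false_iff_not]; exact hodd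
        rw [List.filter_cons_of_neg (by simp [ho]), List.filter_cons_of_pos (by simp [ho])]
        simp

-- B's grouping loop, one class at a time
theorem loopB_getD (M : Int) (l : List (Int × String)) :
    ∀ (d : PySem.Dict Int (List (Int × String))) (c : Int),
      (l.foldl
        (fun (d : PySem.Dict Int (List (Int × String))) p =>
          let g := d.getD p.1 []
          let g' := if (g.length : Int) < M then g ++ [p] else g
          d.insert p.1 g') d).getD c []
      = d.getD c [] ++ (l.filter (fun p => p.1 == c)).take (M - (d.getD c [] : List (Int × String)).length).toNat := by
  induction l with
  | nil => intro d c; simp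
  | cons p t ih =>
    intro d c
    simp only [List.foldl_cons]
    rw [ih]
    by_cases hc : p.1 = c
    · subst hc
      rw [List.filter_cons_of_pos (by simp)]
      by_cases hM : ((d.getD p.1 []).length : Int) < M
      · rw [if_pos hM, PySem.Dict.getD_insert_self]
        have h1 : (M - ((d.getD p.1 []).length : Int)).toNat
            = (M - (((d.getD p.1 [] ++ [p]).length : Int))).toNat + 1 := by
          simp; omega
        rw [h1, List.take_succ_cons]
        simp
      · rw [if_neg hM, PySem.Dict.getD_insert_self]
        have h1 : (M - ((d.getD p.1 []).length : Int)).toNat = 0 := by omega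
        rw [h1]
        simp
    · have hg : (d.insert p.1 (if ((d.getD p.1 []).length : Int) < M then d.getD p.1 [] ++ [p] else d.getD p.1 [])).getD c []
          = d.getD c [] := by simp [PySem.Dict.getD_insert, Ne.symm hc]
      rw [hg, List.filter_cons_of_neg (by simp [hc])]

-- B's loop with the dict lookups known to succeed
theorem loopB_opt (M : Int) (l : List (Int × String)) :
    ∀ (d : PySem.Dict Int (List (Int × String))),
      (∀ p ∈ l, (d.get? p.1).isSome) →
      l.foldl
        (fun (o : Option (PySem.Dict Int (List (Int × String)))) p =>
          o.bind (fun d =>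
            match d.get? p.1 with
            | none => none
            | some g =>
              let g' := if (g.length : Int) < M then g ++ [p] else g
              some (d.insert p.1 g')))
        (some d)
      = some (l.foldl
          (fun (d : PySem.Dict Int (List (Int × String))) p =>
            let g := d.getD p.1 []
            let g' := if (g.length : Int) < M then g ++ [p] else g
            d.insert p.1 g') d) := by
  induction l with
  | nil => intro d _; rfl
  | cons p t ih =>
    intro d hs
    have hv : d.get? p.1 = some (d.getD p.1 []) := by
      rcases Option.isSome_iff_exists.mp (hs p List.mem_cons_self) with ⟨g, hg⟩
      rw [hg, PySem.Dict.getD_eq_get?_getD, hg]; rfl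
    simp only [List.foldl_cons, Option.bind_some, hv]
    apply ih
    intro q hq
    by_cases h : q.1 = p.1
    · rw [h, PySem.Dict.get?_insert_self]; rfl
    · rw [PySem.Dict.get?_insert]
      simp only [if_neg h]
      exact hs q (List.mem_cons_of_mem _ hq)

-- updating a set with elements it already has changes nothing
theorem set_update_self {α : Type} [BEq α] [LawfulBEq α] (xs : List α) :
    ∀ (s : PySem.Set α), (∀ x ∈ xs, x ∈ s) → PySem.Set.update s xs = s := by
  induction xs with
  | nil => intro s _; rfl
  | cons x t ih =>
    intro s hmem
    show PySem.Set.update (PySem.Set.add s x) t = s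
    have hx : PySem.Set.add s x = s := by
      unfold PySem.Set.add
      rw [if_pos ((PySem.Set.contains_iff s x).mpr (hmem x List.mem_cons_self))]
    rw [hx]
    exact ih s (fun y hy => hmem y (List.mem_cons_of_mem _ hy))

theorem loopB_keys (N M : Int) (l : List (Int × String)) (hmem : ∀ p ∈ l, 1 ≤ p.1 ∧ p.1 ≤ N) :
    (l.foldl
      (fun (d : PySem.Dict Int (List (Int × String))) p =>
        let g := d.getD p.1 []
        let g' := if (g.length : Int) < M then g ++ [p] else g
        d.insert p.1 g')
      (PySem.Dict.mk ((PySem.List.pyRange 1 (N+1) 1).map (fun i => (i, ([] : List (Int × String))))))).keys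
    = PySem.List.pyRange 1 (N+1) 1 := by
  show (List.foldl (fun (d : PySem.Dict Int (List (Int × String))) p =>
      d.insert p.1 (if ((d.getD p.1 []).length : Int) < M then d.getD p.1 [] ++ [p] else d.getD p.1 [])) _ l).keys = _
  rw [PySem.Dict.keys_foldl_insert_key l (fun p => p.1)
    (fun d p => if ((d.getD p.1 []).length : Int) < M then d.getD p.1 [] ++ [p] else d.getD p.1 []) _]
  have hkeys0 : (PySem.Dict.mk ((PySem.List.pyRange 1 (N+1) 1).map (fun i => (i, ([] : List (Int × String)))))).keys
      = PySem.List.pyRange 1 (N+1) 1 := by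
    simp only [PySem.Dict.keys]
    show (((PySem.List.pyRange 1 (N+1) 1).map (fun i => (i, ([] : List (Int × String))))).map (·.1)) = _
    rw [List.map_map]
    simp [Function.comp_def]
  rw [hkeys0]
  apply set_update_self
  intro x hx
  rcases List.mem_map.mp hx with ⟨p, hp, hfst⟩
  rw [PySem.List.mem_pyRange_one]
  have := hmem p hp
  omega

-- the initial dicts: every class in 1..N maps to the seed value, nothing else is present
theorem mkmap_get? {ν : Type} (v : ν) (b : Int) : ∀ (n : Nat) (a c : Int), (b - a).toNat = n →
    (PySem.Dict.mk ((PySem.List.pyRange a b 1).map (fun i => (i, v)))).get? c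
      = if a ≤ c ∧ c < b then some v else none := by
  intro n
  induction n with
  | zero =>
    intro a c hn
    rw [PySem.List.pyRange_one_eq_nil (by omega)]
    simp only [List.map_nil]
    rw [if_neg (by omega)]
    rfl
  | succ m ih =>
    intro a c hn
    rw [PySem.List.pyRange_one_cons (by omega)]
    simp only [List.map_cons]
    rw [PySem.Dict.get?_mk_cons, ih (a+1) c (by omega)]
    by_cases hac : a = c
    · subst hac
      simp [(by omega : a ≤ a ∧ a < b)]
    · rw [if_neg (by simpa using hac)]
      by_cases h1 : a + 1 ≤ c ∧ c < b
      · rw [if_pos h1, if_pos (by omega)]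
      · rw [if_neg h1, if_neg (by omega)]

theorem init_get? {ν : Type} (v : ν) (N : Int) (c : Int) :
    (PySem.Dict.mk ((PySem.List.pyRange 1 (N+1) 1).map (fun i => (i, v)))).get? c
      = if 1 ≤ c ∧ c ≤ N then some v else none := by
  rw [mkmap_get? v (N+1) (N+1-1).toNat 1 c rfl]
  by_cases hc : 1 ≤ c ∧ c ≤ N
  · rw [if_pos (by omega), if_pos hc]
  · rw [if_neg (by omega), if_neg hc]

-- flattening the per-class filters of K over distinct classes is a permutation of K
theorem regroup_perm (cs : List Int) : ∀ (K : List (Int × String)), cs.Nodup →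
    (∀ p ∈ K, p.1 ∈ cs) →
    (cs.map (fun c => K.filter (fun p => p.1 == c))).flatten.Perm K := by
  induction cs with
  | nil => intro K _ hin; simp [List.eq_nil_iff_forall_not_mem.mpr (fun p hp => by simpa using hin p hp)]
  | cons c cs' ih =>
    intro K hnd hin
    simp only [List.map_cons, List.flatten_cons]
    have hrest : ∀ c' ∈ cs', K.filter (fun p => p.1 == c')
        = (K.filter (fun p => !(p.1 == c))).filter (fun p => p.1 == c') := by
      intro c' hc'
      rw [List.filter_filter]
      apply List.filter_congr
      intro p _
      by_cases h : p.1 = c'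
      · have hcc : ¬ c' = c := by intro e; exact (List.nodup_cons.mp hnd).1 (e ▸ hc')
        simp [h, hcc]
      · simp [h]
    rw [List.map_congr_left hrest]
    have hih := ih (K.filter (fun p => !(p.1 == c))) (List.nodup_cons.mp hnd).2
      (by
        intro p hp
        obtain ⟨hK, hne⟩ := List.mem_filter.mp hp
        rcases List.mem_cons.mp (hin p hK) with h | h
        · simp [h] at hne
        · exact h)
    exact (hih.append_left _).trans (List.filter_append_perm _ K)

theorem keyB_injective : Function.Injective keyB := by
  intro a b h
  have h1 := congrArg (fun k => (ofLex (ofLex k).2).1) h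
  have h2 := congrArg (fun k => (ofLex (ofLex (ofLex k).2).2).2) h
  simp [keyB, keyA] at h1 h2
  exact Prod.ext h1 h2

theorem keyB_le_of_keyA_le {a b : Int × String} (hp : (PySem.Int.mod a.1 2 == 0) = (PySem.Int.mod b.1 2 == 0))
    (h : keyA a ≤ keyA b) : keyB a ≤ keyB b := by
  unfold keyB
  rw [Prod.Lex.toLex_le_toLex]
  exact Or.inr ⟨hp, h⟩

theorem keyB_lt_of_parity {a b : Int × String} (ha : oddD a = true) (hb : oddD b = false) :
    keyB a ≤ keyB b := by
  unfold keyB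
  rw [Prod.Lex.toLex_le_toLex]
  unfold oddD at ha hb
  left
  simp only [decide_eq_true_eq] at ha
  simp only [decide_eq_false_iff_not, not_not] at hb
  have ha2 : ¬ 2 ∣ a.1 := fun h => ha ((pymod2_zero_iff a.1).mpr h)
  have hb2 : 2 ∣ b.1 := (pymod2_zero_iff b.1).mp hb
  simp [Bool.lt_iff]
  exact ⟨by omega, hb2⟩

-- one sort by (even?, cls, len, name) = sort of the odds ++ sort of the evens
theorem sort_split (K : List (Int × String)) :
    PySem.List.sorted K keyB false
      = PySem.List.sorted (K.filter oddD) keyA false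
        ++ PySem.List.sorted (K.filter (fun p => !oddD p)) keyA false := by
  apply PySem.List.eq_of_perm_of_pairwise_le_of_injective keyB keyB_injective
  · refine (PySem.List.sorted_perm K keyB false).trans ?_
    refine ((List.filter_append_perm oddD K).symm).trans ?_
    exact ((PySem.List.sorted_perm _ keyA false).symm.append
      (PySem.List.sorted_perm _ keyA false).symm)
  · exact PySem.List.sorted_pairwise K keyB
  · rw [List.pairwise_append]
    refine ⟨?_, ?_, ?_⟩
    · refine (PySem.List.sorted_pairwise _ keyA).imp_of_mem ?_
      intro a b ha hb h
      have ha' := (List.mem_filter.mp ((PySem.List.mem_sorted _ _ _ _).mp ha)).2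
      have hb' := (List.mem_filter.mp ((PySem.List.mem_sorted _ _ _ _).mp hb)).2
      apply keyB_le_of_keyA_le ?_ h
      unfold oddD at ha' hb'
      simp only [decide_eq_true_eq] at ha' hb'
      rw [Bool.eq_iff_iff]
      simp only [beq_iff_eq]
      exact iff_of_false ha' hb'
    · refine (PySem.List.sorted_pairwise _ keyA).imp_of_mem ?_
      intro a b ha hb h
      have ha' := (List.mem_filter.mp ((PySem.List.mem_sorted _ _ _ _).mp ha)).2
      have hb' := (List.mem_filter.mp ((PySem.List.mem_sorted _ _ _ _).mp hb)).2
      apply keyB_le_of_keyA_le ?_ h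
      unfold oddD at ha' hb'
      simp only [Bool.not_eq_eq_eq_not, Bool.not_true, decide_eq_false_iff_not, not_not] at ha' hb'
      rw [Bool.eq_iff_iff]
      simp only [beq_iff_eq]
      exact iff_of_true ha' hb'
    · intro a ha b hb
      have ha' := (List.mem_filter.mp ((PySem.List.mem_sorted _ _ _ _).mp ha)).2
      have hb' := (List.mem_filter.mp ((PySem.List.mem_sorted _ _ _ _).mp hb)).2
      exact keyB_lt_of_parity ha' (by simpa using hb')

-- ===== VERDICT (by name: the statement is the Claim_ definition above) =====
theorem solve_spec : Claim_equal_solve := by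
  intro N M cn _ hpre
  unfold Spec_solve
  -- both loops' dict lookups succeed under Pre_
  have hsomeA : ∀ p ∈ cn, ((PySem.Dict.mk ((PySem.List.pyRange 1 (N+1) 1).map (fun i => (i, (0 : Int))))).get? p.1).isSome := by
    intro p hp
    rw [init_get? (0 : Int) N p.1, if_pos (hpre p hp)]
    rfl
  have hsomeB : ∀ p ∈ cn, ((PySem.Dict.mk ((PySem.List.pyRange 1 (N+1) 1).map (fun i => (i, ([] : List (Int × String)))))).get? p.1).isSome := by
    intro p hp
    rw [init_get? ([] : List (Int × String)) N p.1, if_pos (hpre p hp)]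
    rfl
  have hA : solve N M cn
      = PySem.List.sorted ((keptA M (PySem.Dict.mk ((PySem.List.pyRange 1 (N+1) 1).map (fun i => (i, (0 : Int))))) cn).filter oddD) keyA false
        ++ PySem.List.sorted ((keptA M (PySem.Dict.mk ((PySem.List.pyRange 1 (N+1) 1).map (fun i => (i, (0 : Int))))) cn).filter (fun p => !oddD p)) keyA false := by
    have h0 : solve N M cn
        = match cn.foldl
            (fun (o : Option (List (Int × String) × List (Int × String) × PySem.Dict Int Int)) p =>
              o.bind (fun bwd =>
                match bwd.2.2.get? p.1 with
                | none => none
                | some v =>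
                  let d := bwd.2.2.insert p.1 (v + 1)
                  if v + 1 > M then some (bwd.1, bwd.2.1, d)
                  else if PySem.Int.mod p.1 2 ≠ 0 then some (bwd.1 ++ [p], bwd.2.1, d)
                  else some (bwd.1, bwd.2.1 ++ [p], d)))
            (some ([], [], PySem.Dict.mk ((PySem.List.pyRange 1 (N+1) 1).map (fun i => (i, (0 : Int)))))) with
          | none => []
          | some (b, w, _) => PySem.List.sorted b keyA false ++ PySem.List.sorted w keyA false := rfl
    rw [h0, loopA M cn [] [] _ hsomeA]
    simp only [List.nil_append]
  have hB : solve_alt N M cn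
      = PySem.List.sorted
          ((PySem.Dict.values (cn.foldl
            (fun (d : PySem.Dict Int (List (Int × String))) p =>
              let g := d.getD p.1 []
              let g' := if (g.length : Int) < M then g ++ [p] else g
              d.insert p.1 g')
            (PySem.Dict.mk ((PySem.List.pyRange 1 (N+1) 1).map (fun i => (i, ([] : List (Int × String)))))))).foldl
            (fun acc g => acc ++ g) []) keyB false := by
    have h0 : solve_alt N M cn
        = match cn.foldl
            (fun (o : Option (PySem.Dict Int (List (Int × String)))) p =>
              o.bind (fun d =>
                match d.get? p.1 with
                | none => none
                | some g =>
                  let g' := if (g.length : Int) < M then g ++ [p] else g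
                  some (d.insert p.1 g')))
            (some (PySem.Dict.mk ((PySem.List.pyRange 1 (N+1) 1).map (fun i => (i, ([] : List (Int × String))))))) with
          | none => []
          | some groups =>
            PySem.List.sorted ((PySem.Dict.values groups).foldl (fun acc g => acc ++ g) []) keyB false := rfl
    rw [h0, loopB_opt M cn _ hsomeB]
  rw [hA, hB]
  -- the counting dict maps everything to 0 under getD
  have hinit0 : ∀ c, (PySem.Dict.mk ((PySem.List.pyRange 1 (N+1) 1).map (fun i => (i, (0 : Int))))).getD c 0 = 0 := by
    intro c
    rw [PySem.Dict.getD_eq_get?_getD, init_get? (0 : Int) N c]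
    by_cases hc : 1 ≤ c ∧ c ≤ N
    · rw [if_pos hc]; rfl
    · rw [if_neg hc]; rfl
  have hinitB : ∀ c, (PySem.Dict.mk ((PySem.List.pyRange 1 (N+1) 1).map (fun i => (i, ([] : List (Int × String)))))).getD c [] = [] := by
    intro c
    rw [PySem.Dict.getD_eq_get?_getD, init_get? ([] : List (Int × String)) N c]
    by_cases hc : 1 ≤ c ∧ c ≤ N
    · rw [if_pos hc]; rfl
    · rw [if_neg hc]; rfl
  -- B's kept list is a permutation of A's kept list K
  have hkeys := loopB_keys N M cn hpre
  have hnodup : (cn.foldl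
      (fun (d : PySem.Dict Int (List (Int × String))) p =>
        let g := d.getD p.1 []
        let g' := if (g.length : Int) < M then g ++ [p] else g
        d.insert p.1 g')
      (PySem.Dict.mk ((PySem.List.pyRange 1 (N+1) 1).map (fun i => (i, ([] : List (Int × String))))))).keys.Nodup := by
    rw [hkeys]; exact PySem.List.nodup_pyRange_one 1 (N+1)
  have hgetD : ∀ c, (cn.foldl
      (fun (d : PySem.Dict Int (List (Int × String))) p =>
        let g := d.getD p.1 []
        let g' := if (g.length : Int) < M then g ++ [p] else g
        d.insert p.1 g')
      (PySem.Dict.mk ((PySem.List.pyRange 1 (N+1) 1).map (fun i => (i, ([] : List (Int × String))))))).getD c []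
      = (keptA M (PySem.Dict.mk ((PySem.List.pyRange 1 (N+1) 1).map (fun i => (i, (0 : Int))))) cn).filter (fun p => p.1 == c) := by
    intro c
    rw [loopB_getD M cn _ c, keptA_filter M cn c, hinit0, hinitB]
    simp
  have hperm : ((PySem.Dict.values (cn.foldl
      (fun (d : PySem.Dict Int (List (Int × String))) p =>
        let g := d.getD p.1 []
        let g' := if (g.length : Int) < M then g ++ [p] else g
        d.insert p.1 g')
      (PySem.Dict.mk ((PySem.List.pyRange 1 (N+1) 1).map (fun i => (i, ([] : List (Int × String)))))))).foldl
        (fun acc g => acc ++ g) []).Perm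
      (keptA M (PySem.Dict.mk ((PySem.List.pyRange 1 (N+1) 1).map (fun i => (i, (0 : Int))))) cn) := by
    rw [PySem.List.foldl_append_eq_flatten, List.nil_append,
      PySem.Dict.values_eq_map_keys _ hnodup [], List.map_congr_left (fun c _ => hgetD c), hkeys]
    apply regroup_perm
    · exact PySem.List.nodup_pyRange_one 1 (N+1)
    · intro p hp
      have hmem : p ∈ cn := keptA_subset M _ cn p hp
      rw [PySem.List.mem_pyRange_one]
      have := hpre p hmem
      omega
  rw [PySem.List.sorted_eq_sorted_of_perm _ _ keyB keyB_injective hperm]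
  exact (sort_split _).symm
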